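-- pv_equiv track=rewrite | github.com/Answeryy/python_algorithm | LeetCode题解/1961. 检查字符串是否为数组前缀.py | isPrefixString
-- ===== SOURCE A (Python) =====
-- from typing import List
--
-- def isPrefixString(s: str, words: List[str]) -> bool:
--     # 遍历字符串数组words，依次取出字符串拼接判断是否与字符串s相同
--     # 如果相同就返回True，遍历完成若不相等返回False
--     length = len(words)
--     temp_str = ''
--     for i in range(length):
--         temp_str += words[i]
--         if  temp_str == s:
--             return True
--     return False
-- ===== SOURCE B (Python) =====
-- def isPrefixString(s, words):
--     # Length-scan: match each word against s at its offset; no concatenation is built.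
--     n = len(s)
--     pos = 0
--     for w in words:
--         lw = len(w)
--         if pos + lw > n or s[pos:pos+lw] != w:
--             return False
--         pos += lw
--         if pos == n:
--             return True
--     return False
-- ===== Notes on version B (the rewrite author's own statement) =====
-- stated objective: faster
-- what changed: B never builds the concatenation: it scans words once, matching each word against the slice of s at its running offset and returning at the exact length boundary, instead of A's rebuild-and-compare of a growing string each iteration.
import Mathlib
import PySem

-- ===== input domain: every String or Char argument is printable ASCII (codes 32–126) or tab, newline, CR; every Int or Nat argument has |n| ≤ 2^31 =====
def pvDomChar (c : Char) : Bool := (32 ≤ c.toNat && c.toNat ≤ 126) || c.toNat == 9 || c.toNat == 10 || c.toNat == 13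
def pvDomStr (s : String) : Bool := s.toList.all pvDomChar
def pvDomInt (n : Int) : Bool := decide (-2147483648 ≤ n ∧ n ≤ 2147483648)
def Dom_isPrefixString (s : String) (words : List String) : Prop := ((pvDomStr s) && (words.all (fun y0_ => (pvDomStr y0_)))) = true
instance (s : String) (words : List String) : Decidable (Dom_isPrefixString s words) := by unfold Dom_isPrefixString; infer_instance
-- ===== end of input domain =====

-- B replaces A's repeated concatenate-and-compare by a length scan that matches each
-- word against s at its offset (objective: faster, no quadratic string building).


-- ===== PORT A =====
-- A's loop: for i in range(length): temp_str += words[i]; if temp_str == s: return True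
-- (strings carried as List Char per the PySem convention; words[i] is always in range,
-- so pyGetD with default "" reads exactly words[i])
def pvALoop (s : List Char) (words : List String) (idxs : List Int) (temp : List Char) : Bool :=
  match idxs with
  | [] => false
  | i :: rest =>
      let temp' := temp ++ (PySem.List.pyGetD words i "").toList
      if temp' = s then true else pvALoop s words rest temp'

def isPrefixString (s : String) (words : List String) : Bool :=
  pvALoop s.toList words (PySem.List.pyRange 0 (words.length : Int) 1) []

-- ===== PORT B =====
-- B's loop: for w in words: if pos+len(w) > n or s[pos:pos+len(w)] != w: return False;
--           pos += len(w); if pos == n: return True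
def pvBLoop (s : List Char) (n : Int) (ws : List String) (pos : Int) : Bool :=
  match ws with
  | [] => false
  | w :: rest =>
      let lw : Int := PySem.Chars.len w.toList
      if pos + lw > n ∨ PySem.List.slice s (some pos) (some (pos + lw)) ≠ w.toList then false
      else if pos + lw = n then true
      else pvBLoop s n rest (pos + lw)

def isPrefixString_alt (s : String) (words : List String) : Bool :=
  pvBLoop s.toList (PySem.Str.len s) words 0

-- ===== PRECONDITION & SPEC =====
def Spec_isPrefixString (s : String) (words : List String) (out : Bool) : Prop := out = isPrefixString_alt s words
instance (s : String) (words : List String) (out : Bool) : Decidable (Spec_isPrefixString s words out) := by unfold Spec_isPrefixString; infer_instance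

-- ===== CLAIM (what is proved, stated in full; the proofs are below) =====
def Claim_equal_isPrefixString : Prop := ∀ (s : String) (words : List String), Dom_isPrefixString s words → Spec_isPrefixString s words (isPrefixString s words)

-- ===== LEMMAS AND PROOFS =====

-- A's index loop over range(i, len(words)) equals the structural loop over words.drop i
def pvASpec (s : List Char) : List String → List Char → Bool
  | [], _ => false
  | w :: rest, temp =>
      let temp' := temp ++ w.toList
      if temp' = s then true else pvASpec s rest temp'

theorem pvALoop_eq_spec (s : List Char) (words : List String) :
    ∀ (i : Nat) (temp : List Char), i ≤ words.length →
      pvALoop s words (PySem.List.pyRange (i : Int) (words.length : Int) 1) temp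
        = pvASpec s (words.drop i) temp := by
  intro i
  induction h : words.length - i generalizing i with
  | zero =>
      intro temp hle
      have : i = words.length := by omega
      subst this
      rw [PySem.List.pyRange_one_eq_nil (le_refl _)]
      simp [pvALoop, pvASpec]
  | succ k ih =>
      intro temp hle
      have hlt : i < words.length := by omega
      rw [PySem.List.pyRange_one_cons (by exact_mod_cast hlt)]
      have hget : PySem.List.pyGetD words (i : Int) "" = words[i] := by
        rw [PySem.List.pyGetD_natCast]
        simp [hlt]
      have hdrop : words.drop i = words[i] :: words.drop (i + 1) :=
        List.drop_eq_getElem_cons hlt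
      rw [pvALoop, hdrop, pvASpec]
      simp only [hget]
      split
      · rfl
      · have hcast : ((i : Int) + 1) = ((i + 1 : Nat) : Int) := by push_cast; ring
        rw [hcast]
        exact ih (i + 1) (by omega) _ (by omega)

-- once temp is not a prefix of s, A's loop can never hit s again
theorem pvASpec_false_of_not_prefix (s : List Char) :
    ∀ (ws : List String) (temp : List Char), ¬ temp <+: s → pvASpec s ws temp = false := by
  intro ws
  induction ws with
  | nil => intro temp _; rfl
  | cons w rest ih =>
      intro temp hnp
      rw [pvASpec]
      split
      · rename_i heq
        exact absurd (heq ▸ (List.prefix_append temp w.toList)) hnp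
      · exact ih _ (fun hp => hnp ((List.prefix_append temp w.toList).trans hp))

-- if s.take p followed by w is a prefix of s, then w matches s at offset p
theorem pvMatch_of_prefix (s : List Char) (w : List Char) (p : Nat) (hp : p ≤ s.length)
    (hpre : s.take p ++ w <+: s) : (s.drop p).take w.length = w := by
  obtain ⟨t, ht⟩ := hpre
  rw [List.append_assoc] at ht
  have hL : (s.take p).length = p := by rw [List.length_take]; omega
  have hdt : s.drop p = w ++ t := by
    have := congrArg (List.drop p) ht
    rw [List.drop_left' hL] at this
    exact this.symm
  rw [hdt, List.take_left' rfl]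

-- main invariant: A's structural loop at temp = s.take p equals B's loop at pos = p
theorem pvASpec_eq_pvBLoop (s : List Char) :
    ∀ (ws : List String) (p : Nat), p ≤ s.length →
      pvASpec s ws (s.take p) = pvBLoop s (s.length : Int) ws (p : Int) := by
  intro ws
  induction ws with
  | nil => intro p _; rfl
  | cons w rest ih =>
      intro p hp
      rw [pvASpec, pvBLoop]
      simp only [PySem.Chars.len_eq]
      have hslice : PySem.List.slice s (some (p : Int)) (some ((p : Int) + (w.toList.length : Int)))
          = (s.drop p).take w.toList.length := PySem.List.slice_natCast_add s p w.toList.length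
      by_cases hover : p + w.toList.length > s.length
      · -- temp' longer than s: A can never reach s again, B's overshoot test fires
        have hne : ¬ s.take p ++ w.toList = s := by
          intro h
          have := congrArg List.length h
          rw [List.length_append, List.length_take] at this
          omega
        rw [if_neg hne, if_pos (Or.inl (by omega))]
        exact pvASpec_false_of_not_prefix s rest _ (fun hpre => by
          have := hpre.length_le
          rw [List.length_append, List.length_take] at this
          omega)
      · push Not at hover
        by_cases hmatch : (s.drop p).take w.toList.length = w.toList
        · -- word matches s at offset p: temp' = s.take (p + |w|)
          have htemp' : s.take p ++ w.toList = s.take (p + w.toList.length) := by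
            conv_lhs => rw [← hmatch]
            rw [← List.take_add]
          have hBcond : ¬ ((p : Int) + (w.toList.length : Int) > (s.length : Int) ∨
              PySem.List.slice s (some (p : Int)) (some ((p : Int) + (w.toList.length : Int))) ≠ w.toList) := by
            push Not
            exact ⟨by omega, by rw [hslice]; exact hmatch⟩
          by_cases hend : p + w.toList.length = s.length
          · have hs : s.take p ++ w.toList = s := by rw [htemp', hend, List.take_length]
            rw [if_pos hs, if_neg hBcond, if_pos (by omega)]
          · have hne : ¬ s.take p ++ w.toList = s := by
              intro h
              have := congrArg List.length h
              rw [List.length_append, List.length_take] at this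
              omega
            rw [if_neg hne, if_neg hBcond, if_neg (by omega), htemp']
            have hcast : ((p : Int) + (w.toList.length : Int)) = ((p + w.toList.length : Nat) : Int) := by
              push_cast; ring
            rw [hcast]
            exact ih (p + w.toList.length) (by omega)
        · -- word mismatches: temp' is not a prefix of s, both sides are false
          have hnp : ¬ s.take p ++ w.toList <+: s :=
            fun hpre => hmatch (pvMatch_of_prefix s w.toList p hp hpre)
          rw [if_neg (fun h => hnp (by rw [h])),
            if_pos (Or.inr (by rw [hslice]; exact hmatch))]
          exact pvASpec_false_of_not_prefix s rest _ hnp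

-- ===== VERDICT (by name: the statement is the Claim_ definition above) =====
theorem isPrefixString_spec : Claim_equal_isPrefixString := by
  intro s words _
  unfold Spec_isPrefixString isPrefixString isPrefixString_alt
  rw [show (0 : Int) = ((0 : Nat) : Int) from rfl,
    pvALoop_eq_spec s.toList words 0 [] (Nat.zero_le _)]
  simp only [List.drop_zero]
  rw [show ([] : List Char) = s.toList.take 0 from rfl,
    pvASpec_eq_pvBLoop s.toList words 0 (Nat.zero_le _)]
  simp [PySem.Str.len_eq]
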